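-- pv_equiv track=rewrite | github.com/blegloannec/CodeProblems | Kattis/tautology.py | evaluate
-- ===== SOURCE A (Python) =====
-- from operator import eq, and_, or_
--
-- OP = {'K': and_, 'A': or_, 'C': (lambda p,q: (not p) or q), 'E': eq}
--
-- def evaluate(Form, Vars, ValMask):
--     S = []
--     # reverse polish is slightly simpler to evaluate than polish
--     # (operators are evaluated right away, no need to wait for
--     #  their arity be reached in the number of pushed values)
--     # so we do it from right to left
--     for c in reversed(Form):
--         if c=='N':
--             S.append(not S.pop())
--         elif c in OP:
--             p = S.pop()
--             q = S.pop()
--             S.append(OP[c](q,p))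
--         else:
--             #assert c in Vars
--             i = Vars.index(c)
--             S.append(((ValMask>>i)&1) == 1)
--     #assert len(S)==1
--     return S[0]
-- ===== SOURCE B (Python) =====
-- OPS = {'K': (lambda q, p: q and p),
--        'A': (lambda q, p: q or p),
--        'C': (lambda q, p: (not q) or p),
--        'E': (lambda q, p: q == p)}
--
-- def evaluate(Form, Vars, ValMask):
--     # streaming left-to-right evaluation of the Polish formula:
--     # operators wait on a frame stack until their operands arrive
--     pending = []   # frames [op, operands collected so far]
--     result = None
--     for c in Form:
--         if c == 'N' or c in OPS:
--             pending.append([c, []])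
--             continue
--         v = ((ValMask >> Vars.index(c)) & 1) == 1
--         while pending:
--             op, args = pending[-1]
--             args.append(v)
--             if len(args) < (1 if op == 'N' else 2):
--                 break
--             pending.pop()
--             v = (not args[0]) if op == 'N' else OPS[op](args[1], args[0])
--         else:
--             result = v
--     return result
-- ===== Notes on version B (the rewrite author's own statement) =====
-- stated objective: alternative
-- what changed: Replaces the right-to-left reversed-string value-stack reduction with a left-to-right streaming evaluator that keeps a stack of pending operator frames and reduces each operator as soon as its operands arrive; Pre_ excludes only the inputs on which A raises (empty formula, unknown character, stack underflow).
import Mathlib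
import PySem

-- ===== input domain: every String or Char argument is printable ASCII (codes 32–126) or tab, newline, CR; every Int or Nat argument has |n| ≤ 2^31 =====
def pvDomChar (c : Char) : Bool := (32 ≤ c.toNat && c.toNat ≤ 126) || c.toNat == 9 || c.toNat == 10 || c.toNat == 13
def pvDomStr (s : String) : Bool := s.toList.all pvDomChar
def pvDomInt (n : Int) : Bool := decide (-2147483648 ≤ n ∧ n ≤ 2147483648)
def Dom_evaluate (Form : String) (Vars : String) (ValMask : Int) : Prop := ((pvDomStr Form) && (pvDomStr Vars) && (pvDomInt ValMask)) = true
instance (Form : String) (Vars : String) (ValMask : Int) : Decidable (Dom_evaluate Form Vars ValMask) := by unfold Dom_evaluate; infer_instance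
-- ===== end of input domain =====

-- B replaces A's right-to-left value-stack loop over the reversed formula by a left-to-right
-- streaming evaluator with a stack of pending operator frames (alternative decomposition,
-- same cost); Pre_ excludes exactly the inputs on which A raises.


-- ===== PORT A =====
-- the keys of the OP dict, in order
def pvOpKeys : List Char := ['K', 'A', 'C', 'E']

-- OP[c](q, p): and_, or_, (lambda p,q: (not p) or q), eq  — argument order exactly as A calls it
def pvOpApply (c : Char) (q p : Bool) : Bool :=
  if c = 'K' then q && p
  else if c = 'A' then q || p
  else if c = 'C' then (!q) || p
  else q == p

-- ((ValMask >> i) & 1) == 1 after i = Vars.index(c); none = ValueError (c not in Vars).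
-- Python's '>>' on int is Lean's '>>>' on Int (floor shift) and '& 1' is PySem.Int.band.
def pvVarVal? (Vars : List Char) (ValMask : Int) (c : Char) : Option Bool :=
  (PySem.List.index? Vars c).map (fun (i : Nat) => decide (PySem.Int.band (ValMask >>> i) 1 = 1))

-- one iteration of A's loop; the stack S is kept TOP-AT-HEAD (Python appends/pops at the
-- end of the list); none = an exception (pop from empty stack / variable not in Vars)
def pvStepA (Vars : List Char) (ValMask : Int) (S? : Option (List Bool)) (c : Char) : Option (List Bool) :=
  match S? with
  | none => none
  | some S =>
    if c = 'N' then
      match S with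
      | p :: rest => some ((!p) :: rest)
      | [] => none
    else if c ∈ pvOpKeys then
      match S with
      | p :: q :: rest => some (pvOpApply c q p :: rest)
      | _ => none
    else
      match pvVarVal? Vars ValMask c with
      | some v => some (v :: S)
      | none => none

-- for c in reversed(Form): … ; return S[0]   (S[0] = bottom = last of the top-at-head list)
def evaluate (Form : String) (Vars : String) (ValMask : Int) : Bool :=
  match Form.toList.reverse.foldl (pvStepA Vars.toList ValMask) (some []) with
  | some S =>
    match S.getLast? with
    | some v => v
    | none => false     -- S[0] IndexError (empty Form); excluded by Pre_
  | none => false       -- an exception during the loop; excluded by Pre_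

-- ===== PORT B =====
-- Source B's frames are [op, args]; the pending stack is kept top-at-head.
-- arity used in Source B's 'len(args) < (1 if op == 'N' else 2)'
def pvArity (c : Char) : Nat := if c = 'N' then 1 else 2

-- '(not args[0]) if op == 'N' else OPS[op](args[1], args[0])'
def pvFrameVal (op : Char) (args : List Bool) : Bool :=
  if op = 'N' then !(args.getD 0 false) else pvOpApply op (args.getD 1 false) (args.getD 0 false)

-- Source B's inner 'while pending:' loop after computing the variable value v: append v to the
-- top frame's args, reduce completed frames, and when the stack runs empty (the loop's
-- 'else:' branch) store v as the current result
def pvFeed : List (Char × List Bool) → Option Bool → Bool → List (Char × List Bool) × Option Bool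
  | [], _, v => ([], some v)
  | (op, args) :: rest, r, v =>
    let args' := args ++ [v]
    if args'.length < pvArity op then ((op, args') :: rest, r)
    else pvFeed rest r (pvFrameVal op args')

-- one iteration of Source B's 'for c in Form:' loop over the state (pending, result);
-- none = ValueError (variable not in Vars)
def pvStepB (Vars : List Char) (ValMask : Int)
    (st? : Option (List (Char × List Bool) × Option Bool)) (c : Char) :
    Option (List (Char × List Bool) × Option Bool) :=
  match st? with
  | none => none
  | some (pending, r) =>
    if c = 'N' ∨ c ∈ pvOpKeys then some ((c, []) :: pending, r)
    else
      match pvVarVal? Vars ValMask c with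
      | some v => some (pvFeed pending r v)
      | none => none

def evaluate_alt (Form : String) (Vars : String) (ValMask : Int) : Bool :=
  match Form.toList.foldl (pvStepB Vars.toList ValMask) (some ([], none)) with
  | some (_, some v) => v
  | _ => false    -- result is None (no completed formula) or a ValueError; excluded by Pre_

-- ===== PRECONDITION & SPEC =====
-- token weight: a variable pushes one value, N is neutral, a binary operator consumes one net
def pvW (c : Char) : Int := if c = 'N' then 0 else if c ∈ pvOpKeys then -1 else 1
def pvSum (l : List Char) : Int := (l.map pvW).sum

-- Pre_ excludes exactly the inputs on which A raises: an empty formula (S[0] IndexError),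
-- a character that is neither an operator nor in Vars (ValueError), or a stack underflow —
-- the latter happens iff some nonempty suffix of Form has token weight < 1.
def Pre_evaluate (Form : String) (Vars : String) (ValMask : Int) : Prop :=
  Form.toList ≠ [] ∧
  (Form.toList.all (fun c => decide (c = 'N' ∨ c ∈ pvOpKeys ∨ c ∈ Vars.toList)) = true) ∧
  (∀ i < Form.toList.length, 1 ≤ pvSum (Form.toList.drop i))

instance (Form : String) (Vars : String) (ValMask : Int) : Decidable (Pre_evaluate Form Vars ValMask) := by
  unfold Pre_evaluate; infer_instance

def pvWitness_evaluate : String × String × Int := ("CNpq", "pq", 1)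

def Spec_evaluate (Form : String) (Vars : String) (ValMask : Int) (out : Bool) : Prop := out = evaluate_alt Form Vars ValMask
instance (Form : String) (Vars : String) (ValMask : Int) (out : Bool) : Decidable (Spec_evaluate Form Vars ValMask out) := by unfold Spec_evaluate; infer_instance

-- ===== CLAIM (what is proved, stated in full; the proofs are below) =====
def Claim_equal_evaluate : Prop := ∀ (Form : String) (Vars : String) (ValMask : Int), Dom_evaluate Form Vars ValMask → Pre_evaluate Form Vars ValMask → Spec_evaluate Form Vars ValMask (evaluate Form Vars ValMask)

-- ===== LEMMAS AND PROOFS =====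

theorem pvSum_nil : pvSum [] = 0 := rfl

theorem pvSum_cons (c : Char) (l : List Char) : pvSum (c :: l) = pvW c + pvSum l := by
  simp [pvSum]

theorem pvSum_append (l₁ l₂ : List Char) : pvSum (l₁ ++ l₂) = pvSum l₁ + pvSum l₂ := by
  simp [pvSum]

theorem pvSum_pos_ne_nil {l : List Char} (h : 1 ≤ pvSum l) : l ≠ [] := by
  intro hnil; rw [hnil] at h; simp [pvSum_nil] at h

-- KEY: on a valid string all of whose nonempty suffixes have weight ≥ 1, a prefix P of weight
-- 1 splits off; A's stack loop over reversed P pushes P's value on top of any stack, and B's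
-- streaming loop over P feeds the same value to any pending state.
theorem pvKey (Vars : List Char) (ValMask : Int) :
    ∀ fuel l, l ≠ [] → l.length ≤ fuel →
    (∀ c ∈ l, c = 'N' ∨ c ∈ pvOpKeys ∨ c ∈ Vars) →
    (∀ t : List Char, t ≠ [] → t <:+ l → 1 ≤ pvSum t) →
    ∃ v P rest, l = P ++ rest ∧ pvSum P = 1 ∧
      (∀ S : List Bool, P.reverse.foldl (pvStepA Vars ValMask) (some S) = some (v :: S)) ∧
      (∀ (pending : List (Char × List Bool)) (r : Option Bool),
        P.foldl (pvStepB Vars ValMask) (some (pending, r)) = some (pvFeed pending r v)) := by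
  intro fuel
  induction fuel with
  | zero =>
    intro l hne hlen _ _
    exact absurd (List.length_eq_zero_iff.mp (Nat.le_zero.mp hlen)) hne
  | succ fuel ih =>
    intro l hne hlen hvalid hsuf
    match l with
    | [] => exact absurd rfl hne
    | c :: rest =>
      have hlrest : rest.length ≤ fuel := by simpa using hlen
      have hsum_l : 1 ≤ pvSum (c :: rest) := hsuf _ hne List.suffix_rfl
      by_cases hcN : c = 'N'
      · -- negation
        have hwc : pvW c = 0 := by simp [pvW, hcN]
        have hrest1 : 1 ≤ pvSum rest := by rw [pvSum_cons, hwc] at hsum_l; omega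
        obtain ⟨v, P1, r1, heq, hsP1, hfoldA, hfoldB⟩ :=
          ih rest (pvSum_pos_ne_nil hrest1) hlrest
            (fun d hd => hvalid d (List.mem_cons_of_mem _ hd))
            (fun t htne hts => hsuf t htne (hts.trans (List.suffix_cons c rest)))
        refine ⟨!v, c :: P1, r1, by simp [heq], by rw [pvSum_cons, hwc, hsP1]; norm_num, ?_, ?_⟩
        · intro S
          simp only [List.reverse_cons, List.foldl_append, hfoldA S]
          simp [pvStepA, hcN]
        · intro pending r
          have hstep : pvStepB Vars ValMask (some (pending, r)) c
              = some ((c, []) :: pending, r) := by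
            simp [pvStepB, hcN]
          simp only [List.foldl_cons, hstep, hfoldB ((c, []) :: pending) r]
          simp [pvFeed, hcN, pvArity, pvFrameVal]
      · by_cases hcOp : c ∈ pvOpKeys
        · -- binary operator
          have hwc : pvW c = -1 := by simp [pvW, hcN, hcOp]
          have hrest2 : 2 ≤ pvSum rest := by rw [pvSum_cons, hwc] at hsum_l; omega
          obtain ⟨v1, P1, r1, heq1, hsP1, hfoldA1, hfoldB1⟩ :=
            ih rest (pvSum_pos_ne_nil (by omega)) hlrest
              (fun d hd => hvalid d (List.mem_cons_of_mem _ hd))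
              (fun t htne hts => hsuf t htne (hts.trans (List.suffix_cons c rest)))
          have hsr1 : 1 ≤ pvSum r1 := by
            have := pvSum_append P1 r1
            rw [← heq1] at this; omega
          have hr1suf : r1 <:+ rest := ⟨P1, heq1.symm⟩
          have hr1len : r1.length ≤ fuel := by
            have := hr1suf.length_le; omega
          obtain ⟨v2, P2, r2, heq2, hsP2, hfoldA2, hfoldB2⟩ :=
            ih r1 (pvSum_pos_ne_nil hsr1) hr1len
              (fun d hd => hvalid d (List.mem_cons_of_mem _ (heq1 ▸ List.mem_append_right P1 hd)))
              (fun t htne hts =>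
                hsuf t htne ((hts.trans hr1suf).trans (List.suffix_cons c rest)))
          refine ⟨pvOpApply c v2 v1, c :: (P1 ++ P2), r2,
            by simp [heq1, heq2], ?_, ?_, ?_⟩
          · rw [pvSum_cons, hwc, pvSum_append, hsP1, hsP2]; norm_num
          · intro S
            simp only [List.reverse_cons, List.reverse_append, List.foldl_append,
              List.append_assoc, hfoldA2 S, hfoldA1 (v2 :: S)]
            simp [pvStepA, hcN, hcOp]
          · intro pending r
            have hstep : pvStepB Vars ValMask (some (pending, r)) c
                = some ((c, []) :: pending, r) := by
              simp [pvStepB, hcOp]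
            have hN : ¬ c = 'N' := hcN
            have ha2 : pvArity c = 2 := by simp [pvArity, hN]
            simp only [List.foldl_cons, List.foldl_append, hstep,
              hfoldB1 ((c, []) :: pending) r]
            have hfeed1 : pvFeed ((c, []) :: pending) r v1 = ((c, [v1]) :: pending, r) := by
              simp [pvFeed, ha2]
            rw [hfeed1, hfoldB2 ((c, [v1]) :: pending) r]
            simp [pvFeed, ha2, pvFrameVal, hN]
        · -- variable
          have hcV : c ∈ Vars := by
            rcases hvalid c List.mem_cons_self with h | h | h
            · exact absurd h hcN
            · exact absurd h hcOp
            · exact h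
          obtain ⟨i, hi⟩ := (PySem.List.index?_isSome_iff Vars c).mpr hcV |> Option.isSome_iff_exists.mp
          have hval : pvVarVal? Vars ValMask c
              = some (decide (PySem.Int.band (ValMask >>> i) 1 = 1)) := by
            simp only [pvVarVal?, hi, Option.map_some]
          refine ⟨decide (PySem.Int.band (ValMask >>> i) 1 = 1), [c], rest, rfl, ?_, ?_, ?_⟩
          · simp [pvSum, pvW, hcN, hcOp]
          · intro S
            simp [pvStepA, hcN, hcOp, hval]
          · intro pending r
            simp [pvStepB, hcN, hcOp, hval]

-- any suffix is a drop, so Pre_'s indexed form gives the suffix form pvKey needs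
theorem pvSuffix_sum {l t : List Char} (hpre : ∀ i < l.length, 1 ≤ pvSum (l.drop i))
    (htne : t ≠ []) (hts : t <:+ l) : 1 ≤ pvSum t := by
  obtain ⟨p, hp⟩ := hts
  have hdrop : l.drop p.length = t := by rw [← hp]; simp
  have hlt : p.length < l.length := by
    rw [← hp]
    have : 0 < t.length := List.length_pos_iff.mpr htne
    simp; omega
  rw [← hdrop]; exact hpre _ hlt

-- the sequence lemma: on a valid nonempty string all of whose nonempty suffixes weigh ≥ 1,
-- A's stack loop over the reversed string ends with the LAST chunk's value at the bottom of
-- the pushed values, and B's streaming loop ends with an empty pending stack and that same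
-- value as its result, whatever result it starts from.
theorem pvSeqKey (Vars : List Char) (ValMask : Int) :
    ∀ fuel l, l ≠ [] → l.length ≤ fuel →
    (∀ c ∈ l, c = 'N' ∨ c ∈ pvOpKeys ∨ c ∈ Vars) →
    (∀ t : List Char, t ≠ [] → t <:+ l → 1 ≤ pvSum t) →
    ∃ v W, (∀ S : List Bool, l.reverse.foldl (pvStepA Vars ValMask) (some S) = some (W ++ v :: S)) ∧
      (∀ r0 : Option Bool, l.foldl (pvStepB Vars ValMask) (some ([], r0)) = some ([], some v)) := by
  intro fuel
  induction fuel with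
  | zero =>
    intro l hne hlen _ _
    exact absurd (List.length_eq_zero_iff.mp (Nat.le_zero.mp hlen)) hne
  | succ fuel ih =>
    intro l hne hlen hvalid hsuf
    obtain ⟨v1, P, rest, heq, hsP, hfoldA, hfoldB⟩ :=
      pvKey Vars ValMask l.length l hne le_rfl hvalid hsuf
    have hPne : P ≠ [] := by
      intro h; rw [h] at hsP; simp [pvSum_nil] at hsP
    by_cases hr : rest = []
    · subst hr
      refine ⟨v1, [], ?_, ?_⟩
      · intro S
        have : l.reverse = P.reverse := by rw [heq]; simp
        rw [this, hfoldA S]; simp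
      · intro r0
        have : l = P := by simpa using heq
        rw [this, hfoldB [] r0]; simp [pvFeed]
    · have hrsuf : rest <:+ l := ⟨P, heq.symm⟩
      have hrlen : rest.length ≤ fuel := by
        have h1 : P.length + rest.length = l.length := by
          rw [heq]; simp
        have h2 : 0 < P.length := List.length_pos_iff.mpr hPne
        omega
      obtain ⟨v2, W2, hfoldA2, hfoldB2⟩ :=
        ih rest hr hrlen
          (fun c hc => hvalid c (heq ▸ List.mem_append_right P hc))
          (fun t htne hts => hsuf t htne (hts.trans hrsuf))
      refine ⟨v2, v1 :: W2, ?_, ?_⟩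
      · intro S
        have hrev : l.reverse = rest.reverse ++ P.reverse := by rw [heq]; simp
        rw [hrev, List.foldl_append, hfoldA2 S, hfoldA (W2 ++ v2 :: S)]
        simp
      · intro r0
        rw [heq, List.foldl_append, hfoldB [] r0]
        simpa [pvFeed] using hfoldB2 (some v1)

-- ===== VERDICT (by name: the statement is the Claim_ definition above) =====
theorem evaluate_spec : Claim_equal_evaluate := by
  intro Form Vars ValMask _ hpre
  obtain ⟨hne, hvalid0, hsufIdx⟩ := hpre
  have hvalid : ∀ c ∈ Form.toList, c = 'N' ∨ c ∈ pvOpKeys ∨ c ∈ Vars.toList := by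
    simpa only [List.all_eq_true, decide_eq_true_eq] using hvalid0
  obtain ⟨v, W, hfoldA, hfoldB⟩ :=
    pvSeqKey Vars.toList ValMask Form.toList.length Form.toList hne le_rfl hvalid
      (fun t htne hts => pvSuffix_sum hsufIdx htne hts)
  unfold Spec_evaluate evaluate evaluate_alt
  rw [hfoldA [], hfoldB none]
  simp
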